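-- pv_equiv track=rewrite | github.com/DefenseIsAlie/AI-Lab | Lab-3/vnd.py | VariableNeighbourHoodDescent
-- ===== SOURCE A (Python) =====
-- def VariableNeighbourHoodDescent(Neighbourhoods: list):
--     x = [0,0,0]
--     l = 0
--     while(l!=len(Neighbourhoods)):
--         x_1 = BestofNeighbourHood(Neighbourhoods[l])
--         if heuristic(x_1) > heuristic(x):
--             x = x_1
--         else:
--             l+=1
--     return x
--
-- def heuristic(s):
--     return s[0]+s[1]+s[2]
--
-- def BestofNeighbourHood(Neighbourhood: list):
--     x = [0,0,0]
--     k = 0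
--     for x_1 in Neighbourhood:
--         if heuristic(x_1) > heuristic(x):
--             x = x_1
--         else:
--             continue
--     return x
-- ===== SOURCE B (Python) =====
-- def VariableNeighbourHoodDescent(Neighbourhoods: list):
--     best = [0, 0, 0]
--     best_h = 0
--     for neighbourhood in Neighbourhoods:
--         for s in neighbourhood:
--             h = s[0] + s[1] + s[2]
--             if h > best_h:
--                 best = s
--                 best_h = h
--     return best
-- ===== Notes on version B (the rewrite author's own statement) =====
-- stated objective: simpler
-- what changed: Replaced the two-level structure (best-of-each-neighbourhood helper plus a while loop that re-evaluates the same neighbourhood after each improvement) by one flat pass over all elements that caches the best heuristic value.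
import Mathlib
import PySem

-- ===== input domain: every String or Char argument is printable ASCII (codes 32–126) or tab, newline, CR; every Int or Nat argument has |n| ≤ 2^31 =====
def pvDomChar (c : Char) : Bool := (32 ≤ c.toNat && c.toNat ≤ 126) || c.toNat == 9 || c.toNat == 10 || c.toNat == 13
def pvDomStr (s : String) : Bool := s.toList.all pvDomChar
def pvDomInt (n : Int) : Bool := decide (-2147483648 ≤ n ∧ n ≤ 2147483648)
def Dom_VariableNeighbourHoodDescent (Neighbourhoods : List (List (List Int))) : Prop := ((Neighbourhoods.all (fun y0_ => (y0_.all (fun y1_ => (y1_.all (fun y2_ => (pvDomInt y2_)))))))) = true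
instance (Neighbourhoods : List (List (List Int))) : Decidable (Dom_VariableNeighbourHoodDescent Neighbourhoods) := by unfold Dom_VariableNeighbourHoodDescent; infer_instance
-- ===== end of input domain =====

-- B replaces A's best-of-each-neighbourhood helper + re-evaluating while loop by a single
-- flat pass over all elements that caches the best heuristic value (objective: simpler).


-- ===== PORT A =====
-- heuristic(s) = s[0]+s[1]+s[2]; exact under Pre_ (each element has length ≥ 3, so the
-- indices are in range and pyGetD's default is never used).
def pyHeuristic (s : List Int) : Int :=
  PySem.List.pyGetD s 0 0 + PySem.List.pyGetD s 1 0 + PySem.List.pyGetD s 2 0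

def BestofNeighbourHood (Neighbourhood : List (List Int)) : List Int :=
  Neighbourhood.foldl (fun x x_1 => if pyHeuristic x_1 > pyHeuristic x then x_1 else x) [0, 0, 0]

-- A's while loop: the suffix of Neighbourhoods from index l, with the current x.
def vndLoopA (x : List Int) (ns : List (List (List Int))) : List Int :=
  match ns with
  | [] => x
  | n :: rest =>
    if pyHeuristic (BestofNeighbourHood n) > pyHeuristic x then
      vndLoopA (BestofNeighbourHood n) (n :: rest)
    else
      vndLoopA x rest
termination_by
  match ns with
  | [] => 0
  | n :: rest => 2 * rest.length + (if pyHeuristic (BestofNeighbourHood n) > pyHeuristic x then 2 else 1)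
decreasing_by
  · split <;> omega
  · cases rest with
    | nil => simp; split <;> omega
    | cons r rs => simp; split <;> omega

def VariableNeighbourHoodDescent (Neighbourhoods : List (List (List Int))) : List Int :=
  vndLoopA [0, 0, 0] Neighbourhoods

-- ===== PORT B =====
def VariableNeighbourHoodDescent_alt (Neighbourhoods : List (List (List Int))) : List Int :=
  (Neighbourhoods.foldl
    (fun p neighbourhood =>
      neighbourhood.foldl
        (fun (p : List Int × Int) s =>
          let h := PySem.List.pyGetD s 0 0 + PySem.List.pyGetD s 1 0 + PySem.List.pyGetD s 2 0
          if h > p.2 then (s, h) else p)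
        p)
    ([0, 0, 0], 0)).1

-- ===== PRECONDITION & SPEC =====
-- Pre_ excludes exactly the inputs on which Python A raises IndexError: an element list
-- with fewer than 3 entries makes heuristic(s) = s[0]+s[1]+s[2] raise.
def Pre_VariableNeighbourHoodDescent (Neighbourhoods : List (List (List Int))) : Prop :=
  ∀ n ∈ Neighbourhoods, ∀ s ∈ n, 3 ≤ s.length
instance (Neighbourhoods : List (List (List Int))) : Decidable (Pre_VariableNeighbourHoodDescent Neighbourhoods) := by
  unfold Pre_VariableNeighbourHoodDescent; infer_instance

def pvWitness_VariableNeighbourHoodDescent : List (List (List Int)) := [[[1, 2, 3], [0, -1, 4]], [], [[5, 5, 5]]]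

def Spec_VariableNeighbourHoodDescent (Neighbourhoods : List (List (List Int))) (out : List Int) : Prop := out = VariableNeighbourHoodDescent_alt Neighbourhoods
instance (Neighbourhoods : List (List (List Int))) (out : List Int) : Decidable (Spec_VariableNeighbourHoodDescent Neighbourhoods out) := by unfold Spec_VariableNeighbourHoodDescent; infer_instance

-- ===== CLAIM (what is proved, stated in full; the proofs are below) =====
def Claim_equal_VariableNeighbourHoodDescent : Prop := ∀ (Neighbourhoods : List (List (List Int))), Dom_VariableNeighbourHoodDescent Neighbourhoods → Pre_VariableNeighbourHoodDescent Neighbourhoods → Spec_VariableNeighbourHoodDescent Neighbourhoods (VariableNeighbourHoodDescent Neighbourhoods)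

-- ===== LEMMAS AND PROOFS =====

-- A's inner update step.
def vndStep (x e : List Int) : List Int := if pyHeuristic e > pyHeuristic x then e else x

theorem bestOf_eq_foldl (n : List (List Int)) :
    BestofNeighbourHood n = n.foldl vndStep [0, 0, 0] := rfl

theorem heuristic_foldl_mono (n : List (List Int)) (x : List Int) :
    pyHeuristic x ≤ pyHeuristic (n.foldl vndStep x) := by
  induction n generalizing x with
  | nil => simp [List.foldl]
  | cons e t ih =>
    simp only [List.foldl]
    calc pyHeuristic x ≤ pyHeuristic (vndStep x e) := by
          unfold vndStep; split <;> omega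
      _ ≤ _ := ih _

theorem foldl_vs (n : List (List Int)) :
    ∀ x y : List Int, pyHeuristic y ≤ pyHeuristic x →
    n.foldl vndStep x =
      if pyHeuristic (n.foldl vndStep y) > pyHeuristic x then n.foldl vndStep y else x := by
  induction n with
  | nil => intro x y h; simp; omega
  | cons e t ih =>
    intro x y hyx
    simp only [List.foldl]
    by_cases he : pyHeuristic e > pyHeuristic x
    · have hx : vndStep x e = e := by unfold vndStep; simp [he]
      have hy : vndStep y e = e := by unfold vndStep; simp [lt_of_le_of_lt hyx he]
      rw [hx, hy]
      have hm := heuristic_foldl_mono t e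
      have : pyHeuristic (t.foldl vndStep e) > pyHeuristic x := lt_of_lt_of_le he hm
      simp [this]
    · have hx : vndStep x e = x := by unfold vndStep; simp [he]
      rw [hx]
      by_cases hey : pyHeuristic e > pyHeuristic y
      · have hy : vndStep y e = e := by unfold vndStep; simp [hey]
        rw [hy]; exact ih x e (by omega)
      · have hy : vndStep y e = y := by unfold vndStep; simp [hey]
        rw [hy]; exact ih x y hyx

theorem heuristic_zero : pyHeuristic [0, 0, 0] = 0 := by decide

-- A's while loop equals the flat nested fold.
theorem loopA_eq_fold (ns : List (List (List Int))) :
    ∀ x : List Int, 0 ≤ pyHeuristic x →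
    vndLoopA x ns = ns.foldl (fun b n => n.foldl vndStep b) x := by
  induction ns with
  | nil => intro x _; simp [vndLoopA]
  | cons n rest ih =>
    intro x hx
    have hb0 : (0 : Int) ≤ pyHeuristic (BestofNeighbourHood n) := by
      rw [bestOf_eq_foldl]
      calc (0 : Int) = pyHeuristic [0,0,0] := heuristic_zero.symm
        _ ≤ _ := heuristic_foldl_mono n _
    have hfold := foldl_vs n x [0, 0, 0] (by rw [heuristic_zero]; exact hx)
    rw [← bestOf_eq_foldl] at hfold
    by_cases hc : pyHeuristic (BestofNeighbourHood n) > pyHeuristic x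
    · rw [vndLoopA, if_pos hc, vndLoopA, if_neg (lt_irrefl _)]
      simp only [List.foldl]
      rw [hfold, if_pos hc]
      exact ih (BestofNeighbourHood n) hb0
    · rw [vndLoopA, if_neg hc]
      simp only [List.foldl]
      rw [hfold, if_neg hc]
      exact ih x hx

-- B's pair fold tracks (best, heuristic best).
theorem pairfold_inner (n : List (List Int)) :
    ∀ b : List Int,
    n.foldl (fun (p : List Int × Int) s =>
        let h := PySem.List.pyGetD s 0 0 + PySem.List.pyGetD s 1 0 + PySem.List.pyGetD s 2 0
        if h > p.2 then (s, h) else p) (b, pyHeuristic b)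
      = (n.foldl vndStep b, pyHeuristic (n.foldl vndStep b)) := by
  induction n with
  | nil => intro b; simp [List.foldl]
  | cons e t ih =>
    intro b
    simp only [List.foldl]
    by_cases h : pyHeuristic e > pyHeuristic b
    · have : vndStep b e = e := by unfold vndStep; simp [h]
      rw [show (if PySem.List.pyGetD e 0 0 + PySem.List.pyGetD e 1 0 + PySem.List.pyGetD e 2 0 > pyHeuristic b
            then (e, PySem.List.pyGetD e 0 0 + PySem.List.pyGetD e 1 0 + PySem.List.pyGetD e 2 0)
            else (b, pyHeuristic b)) = (e, pyHeuristic e) from by simp [pyHeuristic] at h ⊢; simp [h]]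
      rw [ih e, this]
    · have : vndStep b e = b := by unfold vndStep; simp [h]
      rw [show (if PySem.List.pyGetD e 0 0 + PySem.List.pyGetD e 1 0 + PySem.List.pyGetD e 2 0 > pyHeuristic b
            then (e, PySem.List.pyGetD e 0 0 + PySem.List.pyGetD e 1 0 + PySem.List.pyGetD e 2 0)
            else (b, pyHeuristic b)) = (b, pyHeuristic b) from by simp [pyHeuristic] at h ⊢; simp [h]]
      rw [ih b, this]

theorem pairfold_outer (ns : List (List (List Int))) :
    ∀ b : List Int,
    ns.foldl (fun p neighbourhood =>
        neighbourhood.foldl (fun (p : List Int × Int) s =>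
          let h := PySem.List.pyGetD s 0 0 + PySem.List.pyGetD s 1 0 + PySem.List.pyGetD s 2 0
          if h > p.2 then (s, h) else p) p) (b, pyHeuristic b)
      = (ns.foldl (fun b n => n.foldl vndStep b) b,
         pyHeuristic (ns.foldl (fun b n => n.foldl vndStep b) b)) := by
  induction ns with
  | nil => intro b; simp [List.foldl]
  | cons n rest ih =>
    intro b
    simp only [List.foldl]
    rw [pairfold_inner n b, ih (n.foldl vndStep b)]

theorem alt_eq_fold (ns : List (List (List Int))) :
    VariableNeighbourHoodDescent_alt ns = ns.foldl (fun b n => n.foldl vndStep b) [0, 0, 0] := by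
  unfold VariableNeighbourHoodDescent_alt
  have h := pairfold_outer ns [0, 0, 0]
  rw [heuristic_zero] at h
  rw [h]

-- ===== VERDICT (by name: the statement is the Claim_ definition above) =====
theorem VariableNeighbourHoodDescent_spec : Claim_equal_VariableNeighbourHoodDescent := by
  intro ns _ _
  unfold Spec_VariableNeighbourHoodDescent VariableNeighbourHoodDescent
  rw [alt_eq_fold, loopA_eq_fold ns [0,0,0] (by rw [heuristic_zero])]
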